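-- pv_equiv track=rewrite | github.com/Aurorabili/BITools | split/src/split.py | formatfasta
-- ===== SOURCE A (Python) =====
-- def formatfasta(ana, seq, num=70)->str:
--     """
--     format sequence from string to fasta
--     :param ana: analysis
--     :param seq: sequence
--     :param num: number of characters per line
--     :return: fasta string
--     """
--     ana = ana.replace('\n','').replace('\r','')
--
--     format_seq = ""
--     for i, char in enumerate(seq):
--         format_seq += char
--         if (i + 1) % num == 0:
--             format_seq += "\n"
--     return ana +'\n' + format_seq + "\n"
-- ===== SOURCE B (Python) =====
-- def formatfasta(ana, seq, num=70)->str: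
--     """
--     format sequence from string to fasta
--     :param ana: analysis
--     :param seq: sequence
--     :param num: number of characters per line
--     :return: fasta string
--     """
--     ana = ana.replace('\n','').replace('\r','')
--
--     lines = []
--     i = 0
--     while i < len(seq):
--         lines.append(seq[i:i+num])
--         i += num
--     return ana + '\n' + '\n'.join(lines) + '\n'
-- ===== Notes on version B (the rewrite author's own statement) =====
-- stated objective: simpler
-- what changed: B replaces A's per-character accumulation with a modulo test by slicing the sequence into fixed-width chunks and joining them with newlines; Pre_ excludes num <= 0 with a non-empty sequence, where A raises ZeroDivisionError (num == 0) or B's forward chunking loop does not terminate (num < 0).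
-- intended difference: When seq is non-empty and len(seq) is an exact multiple of num, A appends a newline after the last chunk too and so returns a trailing blank line; B ends the record with the single terminating newline, which is the intended FASTA layout. — e.g. on formatfasta("a", "AC", 2): A returns "a\nAC\n\n", B returns "a\nAC\n"
-- outside the precondition, e.g. on formatfasta('a', 'AC', -1): A returns 'a\nA\nC\n\n', B does not finish within the time limit; on formatfasta('a', 'AC', 0): A raises ZeroDivisionError, B does not finish within the time limit
import Mathlib
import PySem

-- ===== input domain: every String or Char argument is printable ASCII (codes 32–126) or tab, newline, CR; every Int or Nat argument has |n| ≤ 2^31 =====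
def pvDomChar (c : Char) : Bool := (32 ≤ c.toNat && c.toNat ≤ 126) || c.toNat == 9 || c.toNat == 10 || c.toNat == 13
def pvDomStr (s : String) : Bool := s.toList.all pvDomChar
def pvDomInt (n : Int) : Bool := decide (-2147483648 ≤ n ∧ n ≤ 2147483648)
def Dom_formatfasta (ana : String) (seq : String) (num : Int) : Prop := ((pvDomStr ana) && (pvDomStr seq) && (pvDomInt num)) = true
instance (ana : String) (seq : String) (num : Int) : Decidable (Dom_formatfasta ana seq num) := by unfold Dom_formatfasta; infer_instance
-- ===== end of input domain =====

-- B formats the sequence by chunking it into fixed-width slices joined with newlines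
-- instead of A's per-character loop with a modulo test (objective: simpler); on seq
-- lengths that are exact multiples of num, A's extra trailing newline is stated as an
-- intended difference (D_), and Pre_ excludes num ≤ 0 with non-empty seq, where A
-- raises or B does not terminate.


-- ===== PORT A =====
def formatfasta (ana : String) (seq : String) (num : Int) : String :=
  let ana2 := PySem.Chars.replace (PySem.Chars.replace ana.toList ['\n'] []) ['\r'] []
  let formatSeq := (PySem.List.enumerate seq.toList).foldl
    (fun acc p =>
      let acc2 := acc ++ [p.2]
      if PySem.Int.mod (p.1 + 1) num = 0 then acc2 ++ ['\n'] else acc2) []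
  String.mk (ana2 ++ ['\n'] ++ formatSeq ++ ['\n'])

-- ===== PORT B =====
-- 'while i < len(seq): lines.append(seq[i:i+num]); i += num' as structural recursion on
-- the remaining characters (the width = 0 arm only makes the recursion total; Python's
-- loop does not terminate for num ≤ 0 with non-empty seq, which Pre_ excludes).
def fastaChunks (width : Nat) : List Char → List (List Char)
  | [] => []
  | c :: rest =>
      if _h : width = 0 then []
      else (c :: rest).take width :: fastaChunks width ((c :: rest).drop width)
  termination_by l => l.length
  decreasing_by simp; omega

def formatfasta_alt (ana : String) (seq : String) (num : Int) : String :=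
  let ana2 := PySem.Chars.replace (PySem.Chars.replace ana.toList ['\n'] []) ['\r'] []
  let body := PySem.Chars.join ['\n'] (fastaChunks num.toNat seq.toList)
  String.mk (ana2 ++ ['\n'] ++ body ++ ['\n'])

-- ===== PRECONDITION & SPEC =====
-- Pre_ excludes num ≤ 0 with a non-empty seq: there A raises ZeroDivisionError
-- (num == 0) or B's forward chunking loop does not terminate (num < 0).
def Pre_formatfasta (ana : String) (seq : String) (num : Int) : Prop := 0 < num ∨ seq = ""
instance (ana : String) (seq : String) (num : Int) : Decidable (Pre_formatfasta ana seq num) := by unfold Pre_formatfasta; infer_instance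
def pvWitness_formatfasta : String × String × Int := ("gene 1", "ACGTACG", 3)

-- When seq is non-empty and len(seq) is an exact multiple of num, A appends a newline
-- after the last chunk too and returns a trailing blank line; B ends the record with the
-- single terminating newline, the intended FASTA layout.
def D_formatfasta (ana : String) (seq : String) (num : Int) : Prop :=
  seq ≠ "" ∧ 0 < num ∧ num ∣ (seq.toList.length : Int)
instance (ana : String) (seq : String) (num : Int) : Decidable (D_formatfasta ana seq num) := by unfold D_formatfasta; infer_instance

def Spec_formatfasta (ana : String) (seq : String) (num : Int) (out : String) : Prop := ¬ D_formatfasta ana seq num → out = formatfasta_alt ana seq num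
instance (ana : String) (seq : String) (num : Int) (out : String) : Decidable (Spec_formatfasta ana seq num out) := by unfold Spec_formatfasta; infer_instance

def pvDiffWitness_formatfasta : String × String × Int := ("a", "AC", 2)
def pvDiffWitnessOut_formatfasta : String × String := ("a\nAC\n\n", "a\nAC\n")

-- ===== CLAIM (what is proved, stated in full; the proofs are below) =====
def Claim_unchanged_formatfasta : Prop := ∀ (ana : String) (seq : String) (num : Int), Dom_formatfasta ana seq num → Pre_formatfasta ana seq num → Spec_formatfasta ana seq num (formatfasta ana seq num)
def Claim_changed_formatfasta : Prop := Dom_formatfasta (pvDiffWitness_formatfasta.1) (pvDiffWitness_formatfasta.2.1) (pvDiffWitness_formatfasta.2.2) ∧ Pre_formatfasta (pvDiffWitness_formatfasta.1) (pvDiffWitness_formatfasta.2.1) (pvDiffWitness_formatfasta.2.2) ∧ D_formatfasta (pvDiffWitness_formatfasta.1) (pvDiffWitness_formatfasta.2.1) (pvDiffWitness_formatfasta.2.2) ∧ formatfasta (pvDiffWitness_formatfasta.1) (pvDiffWitness_formatfasta.2.1) (pvDiffWitness_formatfasta.2.2) = pvDiffWitnessOut_formatfasta.1 ∧ formatfasta_alt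 (pvDiffWitness_formatfasta.1) (pvDiffWitness_formatfasta.2.1) (pvDiffWitness_formatfasta.2.2) = pvDiffWitnessOut_formatfasta.2 ∧ pvDiffWitnessOut_formatfasta.1 ≠ pvDiffWitnessOut_formatfasta.2
def Claim_exact_formatfasta : Prop := ∀ (ana : String) (seq : String) (num : Int), Dom_formatfasta ana seq num → Pre_formatfasta ana seq num → D_formatfasta ana seq num → formatfasta ana seq num ≠ formatfasta_alt ana seq num

-- ===== LEMMAS AND PROOFS =====

-- String ↔ List Char bridges used by the proofs
lemma toList_mk (l : List Char) : (String.mk l).toList = l :=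
  Eq.symm ((fun {l} {s} => String.ofList_eq.mp) rfl)

lemma str_eq_of_toList {a b : String} (h : a.toList = b.toList) : a = b := by
  have := congrArg String.ofList h
  rwa [String.ofList_toList, String.ofList_toList] at this

-- A's loop body as a named step function (for the lemmas only).
def faStep (num : Int) (acc : List Char) (p : Int × Char) : List Char :=
  let acc2 := acc ++ [p.2]
  if PySem.Int.mod (p.1 + 1) num = 0 then acc2 ++ ['\n'] else acc2

-- the '(i+1) % num == 0' test is divisibility by |num|
lemma mod_cond (num : Int) (m : Nat) :
    (PySem.Int.mod ((m : Int)) num = 0) ↔ num.natAbs ∣ m := by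
  rw [PySem.Int.mod_eq_zero_iff_dvd]
  rw [← Int.natAbs_dvd]
  exact_mod_cast Int.natCast_dvd_natCast.symm

-- a run with no break inserted
lemma fold_partial (num : Int) :
    ∀ (t : List Char) (s : Nat) (acc : List Char),
      (∀ i : Nat, i < t.length → ¬ num.natAbs ∣ (s + i + 1)) →
      (PySem.List.enumerate t ((s : Nat) : Int)).foldl (faStep num) acc = acc ++ t := by
  intro t
  induction t with
  | nil => intro s acc _; simp [PySem.List.enumerate_nil]
  | cons c rest ih =>
    intro s acc h
    rw [PySem.List.enumerate_cons]
    simp only [List.foldl_cons, faStep]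
    have hcast : ((s : Nat) : Int) + 1 = (((s + 1 : Nat)) : Int) := by push_cast; ring
    have h1 : ¬ num.natAbs ∣ (s + 1) := by have := h 0 (by simp); simpa using this
    have h0 : ¬ PySem.Int.mod (((s : Nat) : Int) + 1) num = 0 := by
      rw [hcast, mod_cond]; exact h1
    simp only [h0, if_false]
    rw [hcast]
    rw [ih (s + 1) (acc ++ [c]) (fun i hi => by
      have := h (i + 1) (by simp; omega)
      rw [show s + 1 + i + 1 = s + (i + 1) + 1 by ring]
      exact this)]
    simp

-- a full block: the break fires exactly on the last character
lemma fold_run (num : Int) :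
    ∀ (t : List Char) (s : Nat) (acc : List Char), t ≠ [] →
      (∀ i : Nat, i < t.length → (num.natAbs ∣ (s + i + 1) ↔ i + 1 = t.length)) →
      (PySem.List.enumerate t ((s : Nat) : Int)).foldl (faStep num) acc = acc ++ t ++ ['\n'] := by
  intro t
  induction t with
  | nil => intro s acc h _; exact absurd rfl h
  | cons c rest ih =>
    intro s acc _ h
    rw [PySem.List.enumerate_cons]
    simp only [List.foldl_cons, faStep]
    have hcast : ((s : Nat) : Int) + 1 = (((s + 1 : Nat)) : Int) := by push_cast; ring
    by_cases hr : rest = []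
    · subst hr
      have h0 : num.natAbs ∣ (s + 1) := by
        have := (h 0 (by simp)).mpr (by simp)
        simpa using this
      have hm : PySem.Int.mod (((s : Nat) : Int) + 1) num = 0 := by
        rw [hcast, mod_cond]; exact h0
      simp [hm, PySem.List.enumerate_nil]
    · have h0' := h 0 (by simp)
      have h0 : ¬ num.natAbs ∣ (s + 1) := by
        intro hd
        have := h0'.mp (by simpa using hd)
        simp only [List.length_cons] at this
        exact hr (List.eq_nil_of_length_eq_zero (by omega))
      have hm : ¬ PySem.Int.mod (((s : Nat) : Int) + 1) num = 0 := by
        rw [hcast, mod_cond]; exact h0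
      simp only [hm, if_false]
      rw [hcast]
      rw [ih (s + 1) (acc ++ [c]) hr (fun i hi => by
        have h2 := h (i + 1) (by simp; omega)
        rw [show s + 1 + i + 1 = s + (i + 1) + 1 by ring]
        simp only [List.length_cons] at h2
        exact ⟨fun hd => by have := h2.mp hd; omega, fun he => h2.mpr (by omega)⟩)]
      simp

-- main invariant: from a position that is a multiple of |num|, A's fold produces
-- exactly the chunked body joined with newlines, plus one more newline when the
-- remaining length is an exact multiple
lemma fold_eq_chunks (num : Int) (hnum : num ≠ 0) :
    ∀ (n : Nat) (l : List Char), l.length ≤ n → ∀ (acc : List Char) (k : Nat),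
      (PySem.List.enumerate l (((num.natAbs * k : Nat)) : Int)).foldl (faStep num) acc =
        acc ++ PySem.Chars.join ['\n'] (fastaChunks num.natAbs l) ++
          (if l ≠ [] ∧ PySem.Int.mod ((l.length : Int)) num = 0 then ['\n'] else []) := by
  intro n
  induction n with
  | zero =>
    intro l hl acc k
    have : l = [] := List.eq_nil_of_length_eq_zero (by omega)
    subst this
    simp [PySem.List.enumerate_nil, fastaChunks, PySem.Chars.join_nil]
  | succ n ih =>
    intro l hl acc k
    set w := num.natAbs with hwdef
    have hw : w ≠ 0 := by simpa [hwdef] using Int.natAbs_ne_zero.mpr hnum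
    match hL : l with
    | [] => simp [PySem.List.enumerate_nil, fastaChunks, PySem.Chars.join_nil]
    | c :: rest =>
      by_cases hlt : (c :: rest).length < w
      · -- one short final chunk, no newline fires
        rw [fold_partial num (c :: rest) (w * k) acc (by
          intro i hi hd
          rw [show w * k + i + 1 = w * k + (i + 1) by ring] at hd
          have : w ∣ (i + 1) := (Nat.dvd_add_right ⟨k, rfl⟩).mp hd
          have := Nat.le_of_dvd (by omega) this
          omega)]
        have hdrop : (c :: rest).drop w = [] := List.drop_eq_nil_of_le (by omega)
        have htake : (c :: rest).take w = c :: rest := List.take_of_length_le (by omega)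
        rw [fastaChunks]
        simp only [hw, dite_false, reduceDIte, hdrop, htake]
        rw [fastaChunks]
        have hnd : ¬ PySem.Int.mod ((rest.length : Int) + 1) num = 0 := by
          rw [show (rest.length : Int) + 1 = (((rest.length + 1 : Nat)) : Int) by push_cast; ring, mod_cond]
          intro hd
          have := Nat.le_of_dvd (by omega) hd
          simp only [List.length_cons] at hlt
          omega
        simp [PySem.Chars.join_singleton, hnd]
      · -- a full chunk of width w, then recurse
        push_neg at hlt
        simp only [List.length_cons] at hlt hl
        have hw1 : 1 ≤ w := Nat.pos_of_ne_zero hw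
        set t := (c :: rest).take w with htdef
        set d := (c :: rest).drop w with hddef
        have hts : t ++ d = c :: rest := List.take_append_drop w (c :: rest)
        have htlen : t.length = w := by
          simp only [htdef, List.length_take, List.length_cons]; omega
        have hdlen : d.length = rest.length + 1 - w := by
          simp only [hddef, List.length_drop, List.length_cons]
        rw [← hts, PySem.List.enumerate_append, List.foldl_append]
        rw [fold_run num t (w * k) acc (fun h0 => hw (by simpa [h0] using htlen.symm)) (by
          intro i hi
          rw [htlen] at hi ⊢
          constructor
          · intro hd2
            rw [show w * k + i + 1 = w * k + (i + 1) by ring] at hd2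
            have h3 : w ∣ (i + 1) := (Nat.dvd_add_right ⟨k, rfl⟩).mp hd2
            have := Nat.le_of_dvd (by omega) h3
            omega
          · intro he
            rw [show w * k + i + 1 = w * k + (i + 1) by ring, he]
            exact ⟨k + 1, by ring⟩)]
        have hcast : (((w * k : Nat)) : Int) + (t.length : Int) = (((w * (k + 1) : Nat)) : Int) := by
          rw [htlen]; push_cast; ring
        rw [hcast]
        rw [ih d (by rw [hdlen]; omega) (acc ++ t ++ ['\n']) (k + 1)]
        -- now identify the chunked body
        rw [hts]
        have hchunks : fastaChunks w (c :: rest) = t :: fastaChunks w d := by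
          rw [fastaChunks]; simp [hw, htdef, hddef]
        rw [hchunks]
        by_cases hd0 : d = []
        · have hlen2 : rest.length + 1 = w := by
            have := congrArg List.length hts
            rw [hd0] at this
            simp only [List.append_nil, htlen, List.length_cons] at this
            omega
          have hmd : PySem.Int.mod (((c :: rest).length : Int)) num = 0 := by
            rw [mod_cond]
            simp only [List.length_cons]
            exact ⟨1, by omega⟩
          have hmd' : PySem.Int.mod ((rest.length : Int) + 1) num = 0 := by
            rw [show ((rest.length : Int) + 1) = ((((c :: rest).length : Nat)) : Int) by simp]
            exact hmd
          simp [hd0, hmd', fastaChunks, PySem.Chars.join_singleton, PySem.Chars.join_nil]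
        · obtain ⟨c', r', hD⟩ : ∃ c' r', d = c' :: r' := by
            cases hdd : d with
            | nil => exact absurd hdd hd0
            | cons x xs => exact ⟨x, xs, rfl⟩
          rw [hD]
          have hch2 : fastaChunks w (c' :: r') =
              (c' :: r').take w :: fastaChunks w ((c' :: r').drop w) := by
            rw [fastaChunks]; simp [hw]
          rw [hch2, PySem.Chars.join_cons_cons, ← hch2]
          have hcond : (PySem.Int.mod (((c' :: r').length : Int)) num = 0) ↔
              (PySem.Int.mod (((c :: rest).length : Int)) num = 0) := by
            rw [mod_cond, mod_cond]
            have hlen2 : (c :: rest).length = w + (c' :: r').length := by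
              have := congrArg List.length hts
              rw [hD] at this
              simp only [List.length_append, htlen] at this
              simp only [List.length_cons] at this ⊢
              omega
            rw [hlen2]
            exact ⟨fun hd => (Nat.dvd_add_right ⟨1, by ring⟩).mpr hd,
                  fun hd => (Nat.dvd_add_right ⟨1, by ring⟩).mp hd⟩
          have hcond2 : (PySem.Int.mod ((r'.length : Int) + 1) num = 0) ↔
              (PySem.Int.mod ((rest.length : Int) + 1) num = 0) := by
            rw [show ((r'.length : Int) + 1) = ((((c' :: r').length : Nat)) : Int) by simp,
                show ((rest.length : Int) + 1) = ((((c :: rest).length : Nat)) : Int) by simp]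
            exact hcond
          have hif : (if PySem.Int.mod ((r'.length : Int) + 1) num = 0 then (['\n'] : List Char) else []) =
              (if PySem.Int.mod ((rest.length : Int) + 1) num = 0 then ['\n'] else []) :=
            if_congr hcond2 rfl rfl
          by_cases hm : PySem.Int.mod (((c' :: r').length : Int)) num = 0
          · simp [hm, hcond.mp hm, hif]
          · simp [hm, (not_iff_not.mpr hcond).mp hm, hif]

-- definitional restatements of the two ports over the named step function
lemma formatfasta_unfold (ana seq : String) (num : Int) :
    formatfasta ana seq num =
      String.mk (PySem.Chars.replace (PySem.Chars.replace ana.toList ['\n'] []) ['\r'] []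
        ++ ['\n'] ++ (PySem.List.enumerate seq.toList).foldl (faStep num) [] ++ ['\n']) := rfl

lemma formatfasta_alt_unfold (ana seq : String) (num : Int) :
    formatfasta_alt ana seq num =
      String.mk (PySem.Chars.replace (PySem.Chars.replace ana.toList ['\n'] []) ['\r'] []
        ++ ['\n'] ++ PySem.Chars.join ['\n'] (fastaChunks num.toNat seq.toList) ++ ['\n']) := rfl

-- for 0 < num the two width expressions coincide
lemma natAbs_eq_toNat_of_pos (num : Int) (h : 0 < num) : num.natAbs = num.toNat := by
  omega

-- A's fold, specialised to the start of the sequence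
lemma fold_top (num : Int) (hnum : 0 < num) (l : List Char) :
    (PySem.List.enumerate l 0).foldl (faStep num) [] =
      PySem.Chars.join ['\n'] (fastaChunks num.toNat l) ++
        (if l ≠ [] ∧ PySem.Int.mod ((l.length : Int)) num = 0 then ['\n'] else []) := by
  have hmain := fold_eq_chunks num (by omega) l.length l (le_refl _) [] 0
  simp only [Nat.mul_zero, Nat.cast_zero] at hmain
  rw [natAbs_eq_toNat_of_pos num hnum] at hmain
  simpa using hmain

-- ===== VERDICT (by name: the statements are the Claim_ definitions above) =====
theorem formatfasta_spec : Claim_unchanged_formatfasta := by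
  intro ana seq num _ hpre
  intro hnd
  rw [formatfasta_unfold, formatfasta_alt_unfold]
  by_cases hseq : seq = ""
  · subst hseq
    have hnil : ("" : String).toList = [] := rfl
    simp [hnil, PySem.List.enumerate_nil, fastaChunks, PySem.Chars.join_nil]
  · have hnum : 0 < num := by
      rcases hpre with h | h
      · exact h
      · exact absurd h hseq
    rw [fold_top num hnum]
    have hmod : ¬ PySem.Int.mod ((seq.toList.length : Int)) num = 0 := by
      intro hm
      apply hnd
      refine ⟨hseq, hnum, ?_⟩
      rw [mod_cond] at hm
      have h4 : ((num.natAbs : Nat) : Int) ∣ (seq.toList.length : Int) := Int.natCast_dvd_natCast.mpr hm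
      rwa [Int.natAbs_of_nonneg (le_of_lt hnum)] at h4
    have hlen : (seq.length : Int) = (seq.toList.length : Int) := by simp
    simp [hlen, hmod]

theorem formatfasta_changed : Claim_changed_formatfasta := by
  unfold Claim_changed_formatfasta
  refine ⟨by decide, by decide, by decide, ?_, ?_, by decide⟩
  · apply str_eq_of_toList
    simp [pvDiffWitness_formatfasta, pvDiffWitnessOut_formatfasta, formatfasta, toList_mk,
      PySem.Chars.replace, PySem.List.enumerate, PySem.Int.mod, fastaChunks, PySem.Chars.join]
    decide
  · apply str_eq_of_toList
    simp [pvDiffWitness_formatfasta, pvDiffWitnessOut_formatfasta, formatfasta_alt, toList_mk,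
      PySem.Chars.replace, fastaChunks, PySem.Chars.join]
    decide

theorem formatfasta_tight : Claim_exact_formatfasta := by
  intro ana seq num _ _ hd
  rcases hd with ⟨hseq, hnum, hdvd⟩
  rw [formatfasta_unfold, formatfasta_alt_unfold, fold_top num hnum]
  have hmod : PySem.Int.mod ((seq.toList.length : Int)) num = 0 := by
    rw [mod_cond]
    simpa using Int.natAbs_dvd_natAbs.mpr hdvd
  have hne : seq.toList ≠ [] := by
    intro h
    apply hseq
    have := congrArg String.ofList h
    rwa [String.ofList_toList] at this
  simp only [hne, hmod, ne_eq, not_false_eq_true, and_self, if_true]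
  intro heq
  have h2 := congrArg String.toList heq
  simp only [toList_mk] at h2
  have h3 := congrArg List.length h2
  simp [List.length_append] at h3
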